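-- pv_equiv track=rewrite | github.com/vinidixit/hierarchical-labelled-clustering | cfis/src/generate_label_names.py | _apply_positions
-- ===== SOURCE A (Python) =====
-- def _apply_positions(multi_word_key, n_gram):
--     positions = []
--     for word in multi_word_key:
--         positions.append(n_gram.index(word))
--
--     label = []
--     for pos in sorted(positions):
--         label.append(n_gram[pos])
--
--     return tuple(label)
-- ===== SOURCE B (Python) =====
-- def _apply_positions(multi_word_key, n_gram):
--     # Scan the n-gram left to right; at each word's first occurrence, emit it
--     # once per time it appears in multi_word_key.
--     label = []
--     seen = set()
--     for w in n_gram: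
--         if w not in seen:
--             seen.add(w)
--             label += [w] * multi_word_key.count(w)
--     if len(label) != len(multi_word_key):
--         raise ValueError("some key word does not occur in the n-gram")
--     return tuple(label)
-- ===== Notes on version B (the rewrite author's own statement) =====
-- stated objective: alternative
-- what changed: B scans the n-gram once in position order and emits each word at its first occurrence, repeated by its multiplicity in multi_word_key, instead of collecting each key word's index and sorting the index list.
import Mathlib
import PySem

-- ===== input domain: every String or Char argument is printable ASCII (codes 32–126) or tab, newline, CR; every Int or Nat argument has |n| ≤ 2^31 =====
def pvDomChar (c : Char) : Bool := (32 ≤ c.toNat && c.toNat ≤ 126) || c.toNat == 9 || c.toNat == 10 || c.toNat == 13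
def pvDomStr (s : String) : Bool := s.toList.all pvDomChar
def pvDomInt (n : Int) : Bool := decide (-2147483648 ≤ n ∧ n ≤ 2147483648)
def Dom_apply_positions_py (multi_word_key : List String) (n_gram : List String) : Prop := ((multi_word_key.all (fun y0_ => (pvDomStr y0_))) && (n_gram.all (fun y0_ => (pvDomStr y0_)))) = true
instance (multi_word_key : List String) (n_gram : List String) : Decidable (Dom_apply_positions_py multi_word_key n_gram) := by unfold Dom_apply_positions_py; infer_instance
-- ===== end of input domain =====

-- B replaces A's index-then-sort pass by a single in-order scan of the n-gram
-- emitting each word at its first occurrence (alternative decomposition, same result).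

-- ===== PORT A =====
-- positions.append(n_gram.index(word)); n_gram.index raises outside Pre_, totalised with getD 0 there
def apply_positions_py (multi_word_key : List String) (n_gram : List String) : List String :=
  let positions : List Nat :=
    multi_word_key.foldl (fun acc word => acc ++ [(PySem.List.index? n_gram word).getD 0]) []
  (PySem.List.sorted positions (fun x => x) false).foldl
    (fun label pos => label ++ [n_gram.getD pos ""]) []

-- ===== PORT B =====
-- Source B's final length check raises ValueError outside Pre_ (missing key word) and is the
-- identity inside it, so the port returns the scanned label unconditionally.
def apply_positions_py_alt (multi_word_key : List String) (n_gram : List String) : List String :=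
  (n_gram.foldl
    (fun (st : List String × PySem.Set String) w =>
      if PySem.Set.contains st.2 w then st
      else (st.1 ++ List.replicate (PySem.List.count multi_word_key w) w, PySem.Set.add st.2 w))
    ([], PySem.Set.empty)).1

-- ===== PRECONDITION & SPEC =====
-- Pre_ excludes inputs where some key word is absent from n_gram: there A raises ValueError.
def Pre_apply_positions_py (multi_word_key : List String) (n_gram : List String) : Prop :=
  ∀ w ∈ multi_word_key, w ∈ n_gram
instance (multi_word_key : List String) (n_gram : List String) : Decidable (Pre_apply_positions_py multi_word_key n_gram) := by unfold Pre_apply_positions_py; infer_instance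
def pvWitness_apply_positions_py : List String × List String := (["b", "a", "b"], ["a", "c", "b"])

def Spec_apply_positions_py (multi_word_key : List String) (n_gram : List String) (out : List String) : Prop := out = apply_positions_py_alt multi_word_key n_gram
instance (multi_word_key : List String) (n_gram : List String) (out : List String) : Decidable (Spec_apply_positions_py multi_word_key n_gram out) := by unfold Spec_apply_positions_py; infer_instance

-- ===== CLAIM (what is proved, stated in full; the proofs are below) =====
def Claim_equal_apply_positions_py : Prop := ∀ (multi_word_key : List String) (n_gram : List String), Dom_apply_positions_py multi_word_key n_gram → Pre_apply_positions_py multi_word_key n_gram → Spec_apply_positions_py multi_word_key n_gram (apply_positions_py multi_word_key n_gram)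


-- ===== LEMMAS AND PROOFS =====

-- the list of first occurrences in `rest` of words not already in the seen-set `s`, in order
def pvNewOcc (s : PySem.Set String) : List String → List String
  | [] => []
  | w :: t => if PySem.Set.contains s w then pvNewOcc s t else w :: pvNewOcc (PySem.Set.add s w) t

theorem pvAlt_foldl (mwk : List String) (ng : List String) (acc : List String) (s : PySem.Set String) :
    (ng.foldl
      (fun (st : List String × PySem.Set String) w =>
        if PySem.Set.contains st.2 w then st
        else (st.1 ++ List.replicate (PySem.List.count mwk w) w, PySem.Set.add st.2 w))
      (acc, s)).1
    = acc ++ (pvNewOcc s ng).flatMap (fun w => List.replicate (mwk.count w) w) := by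
  induction ng generalizing acc s with
  | nil => simp [pvNewOcc]
  | cons r t ih =>
    rw [List.foldl_cons]
    by_cases h : PySem.Set.contains s r = true
    · rw [if_pos h, show pvNewOcc s (r :: t) = pvNewOcc s t from by rw [pvNewOcc, if_pos h], ih]
    · rw [if_neg h, ih,
        show pvNewOcc s (r :: t) = r :: pvNewOcc (PySem.Set.add s r) t from by
          rw [pvNewOcc, if_neg h]]
      simp [PySem.List.count_eq]

theorem pvMem_newOcc (ng : List String) : ∀ (s : PySem.Set String) (w : String),
    w ∈ pvNewOcc s ng ↔ w ∈ ng ∧ w ∉ s := by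
  induction ng with
  | nil => simp [pvNewOcc]
  | cons r t ih =>
    intro s w
    by_cases h : PySem.Set.contains s r = true
    · have hr : r ∈ s := (PySem.Set.contains_iff s r).1 h
      rw [pvNewOcc, if_pos h]
      simp only [ih, List.mem_cons]
      constructor
      · rintro ⟨hw, hs⟩; exact ⟨Or.inr hw, hs⟩
      · rintro ⟨hw | hw, hs⟩
        · subst hw; exact absurd hr hs
        · exact ⟨hw, hs⟩
    · have hr : r ∉ s := fun hm => h ((PySem.Set.contains_iff s r).2 hm)
      rw [pvNewOcc, if_neg h]
      simp only [List.mem_cons, ih, PySem.Set.mem_add]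
      constructor
      · rintro (rfl | ⟨hw, hs⟩)
        · exact ⟨Or.inl rfl, hr⟩
        · exact ⟨Or.inr hw, fun hc => hs (Or.inl hc)⟩
      · rintro ⟨rfl | hw, hs⟩
        · exact Or.inl rfl
        · by_cases hwr : w = r
          · exact Or.inl hwr
          · exact Or.inr ⟨hw, fun hc => hc.elim hs hwr⟩

theorem pvOfList_snoc (pre : List String) (r : String) :
    PySem.Set.ofList (pre ++ [r]) = PySem.Set.add (PySem.Set.ofList pre) r := by
  rw [PySem.Set.ofList_eq_foldl, PySem.Set.ofList_eq_foldl, List.foldl_append]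
  rfl

theorem pvNewOcc_ordered (ng : List String) : ∀ (rest pre : List String), ng = pre ++ rest →
    (∀ w ∈ pvNewOcc (PySem.Set.ofList pre) rest, w ∉ pre) ∧
    (pvNewOcc (PySem.Set.ofList pre) rest).Pairwise (fun a b => ng.idxOf a < ng.idxOf b) := by
  intro rest
  induction rest with
  | nil => intro pre _; simp [pvNewOcc]
  | cons r t ih =>
    intro pre hng
    by_cases h : r ∈ pre
    · have hc : PySem.Set.contains (PySem.Set.ofList pre) r = true :=
        (PySem.Set.contains_iff _ r).2 ((PySem.Set.mem_ofList pre r).2 h)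
      have heq : PySem.Set.ofList (pre ++ [r]) = PySem.Set.ofList pre := by
        rw [pvOfList_snoc, PySem.Set.add_of_mem ((PySem.Set.mem_ofList pre r).2 h)]
      have hthis := ih (pre ++ [r]) (by simp [hng])
      rw [heq] at hthis
      have hrw : pvNewOcc (PySem.Set.ofList pre) (r :: t) = pvNewOcc (PySem.Set.ofList pre) t := by
        rw [pvNewOcc, if_pos hc]
      rw [hrw]
      refine ⟨?_, hthis.2⟩
      intro w hw hwp
      exact hthis.1 w hw (by simp [hwp])
    · have hc : ¬ PySem.Set.contains (PySem.Set.ofList pre) r = true := by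
        intro hcc
        exact h ((PySem.Set.mem_ofList pre r).1 ((PySem.Set.contains_iff _ r).1 hcc))
      have ihr := ih (pre ++ [r]) (by simp [hng])
      have hnew : pvNewOcc (PySem.Set.ofList pre) (r :: t)
          = r :: pvNewOcc (PySem.Set.ofList (pre ++ [r])) t := by
        rw [pvNewOcc, if_neg hc, pvOfList_snoc]
      rw [hnew]
      constructor
      · intro w hw
        rcases List.mem_cons.1 hw with rfl | hw
        · exact h
        · intro hwp; exact ihr.1 w hw (by simp [hwp])
      · refine List.pairwise_cons.2 ⟨?_, ihr.2⟩
        intro b hb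
        have hbpre : b ∉ pre ++ [r] := ihr.1 b hb
        have hr : ng.idxOf r = pre.length := by
          rw [hng, List.idxOf_append_of_notMem h, List.idxOf_cons_self]
          omega
        have hbig : ng.idxOf b = (pre ++ [r]).length + List.idxOf b t := by
          have hng2 : ng = (pre ++ [r]) ++ t := by simp [hng]
          rw [hng2, List.idxOf_append_of_notMem hbpre]
        rw [hr, hbig]
        simp only [List.length_append, List.length_cons, List.length_nil]
        omega

theorem pvFlatMap_congr_mem {α β : Type} (D : List α) (f g : α → List β)
    (h : ∀ w ∈ D, f w = g w) : D.flatMap f = D.flatMap g := by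
  induction D with
  | nil => rfl
  | cons d D' ih =>
    simp only [List.flatMap_cons, h d (List.mem_cons_self), ih (fun w hw => h w (List.mem_cons_of_mem _ hw))]

theorem pvPerm_group (l : List String) (D : List String) (hnd : D.Nodup)
    (hmem : ∀ w ∈ l, w ∈ D) :
    l.Perm (D.flatMap (fun w => List.replicate (l.count w) w)) := by
  induction D generalizing l with
  | nil =>
    have : l = [] := List.eq_nil_iff_forall_not_mem.2 (fun a ha => by simpa using hmem a ha)
    simp [this]
  | cons d D' ih =>
    have hnd' : D'.Nodup := (List.nodup_cons.1 hnd).2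
    have hdD' : d ∉ D' := (List.nodup_cons.1 hnd).1
    have hperm := List.filter_append_perm (· == d) l
    set l' := l.filter (fun x => !(x == d)) with hl'
    have hmem' : ∀ w ∈ l', w ∈ D' := by
      intro w hw
      rw [hl', List.mem_filter] at hw
      have hwl := hw.1
      have hne : w ≠ d := by simpa using hw.2
      rcases List.mem_cons.1 (hmem w hwl) with h | h
      · exact absurd h hne
      · exact h
    have ihl := ih l' hnd' hmem'
    have hcount : ∀ w ∈ D', l'.count w = l.count w := by
      intro w hwD
      have hne : (fun x => !(x == d)) w = true := by
        simp
        rintro rfl; exact hdD' hwD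
      exact List.count_filter hne
    have hflat : D'.flatMap (fun w => List.replicate (l'.count w) w)
        = D'.flatMap (fun w => List.replicate (l.count w) w) :=
      pvFlatMap_congr_mem _ _ _ (fun w hw => by rw [hcount w hw])
    have h2 : l.Perm (List.replicate (l.count d) d ++ l') := by
      rw [← List.filter_beq]; exact hperm.symm
    have h1 : (List.replicate (l.count d) d ++ l').Perm
        (List.replicate (l.count d) d ++ D'.flatMap (fun w => List.replicate (l.count w) w)) :=
      (ihl.trans (hflat ▸ List.Perm.refl _)).append_left _
    have h3 : List.replicate (l.count d) d ++ D'.flatMap (fun w => List.replicate (l.count w) w)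
        = (d :: D').flatMap (fun w => List.replicate (l.count w) w) := by
      rw [List.flatMap_cons]
    exact (h2.trans h1).trans (h3 ▸ List.Perm.refl _)

theorem pvPairwise_flatMap (D : List String) (f : String → Nat) (n : String → Nat)
    (h : D.Pairwise (fun a b => f a < f b)) :
    (D.flatMap (fun w => List.replicate (n w) (f w))).Pairwise (fun a b => a ≤ b) := by
  induction D with
  | nil => simp
  | cons d D' ih =>
    rcases List.pairwise_cons.1 h with ⟨hd, ht⟩
    simp only [List.flatMap_cons]
    rw [List.pairwise_append]
    refine ⟨List.pairwise_replicate.2 (Or.inr (le_refl (f d))), ih ht, ?_⟩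
    intro a ha b hb
    have ha' : a = f d := (List.eq_of_mem_replicate ha)
    rcases List.mem_flatMap.1 hb with ⟨w, hw, hbw⟩
    have hb' : b = f w := List.eq_of_mem_replicate hbw
    subst ha'; subst hb'
    exact le_of_lt (hd w hw)

theorem pvIdxOf?_getD (ng : List String) (w : String) (h : w ∈ ng) :
    (ng.idxOf? w).getD 0 = ng.idxOf w := by
  induction ng with
  | nil => simp at h
  | cons r t ih =>
    by_cases hr : r = w
    · subst hr; simp [List.idxOf?_cons]
    · rcases List.mem_cons.1 h with rfl | hw
      · exact absurd rfl hr
      · have hs : (List.idxOf? w t).isSome := by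
          rw [Option.isSome_iff_ne_none]
          simp [List.idxOf?_eq_none_iff, hw]
        rcases Option.isSome_iff_exists.1 hs with ⟨k, hk⟩
        simp [List.idxOf?_cons, hr, hk, ← ih hw]

theorem pvGetD_idxOf (ng : List String) (w : String) (h : w ∈ ng) :
    ng.getD (ng.idxOf w) "" = w := by
  rw [List.getD_eq_getElem _ _ (List.idxOf_lt_length_of_mem h)]
  exact List.getElem_idxOf _

-- ===== VERDICT (by name: the statement is the Claim_ definition above) =====
theorem apply_positions_py_spec : Claim_equal_apply_positions_py := by
  intro mwk ng _ hpre
  show apply_positions_py mwk ng = apply_positions_py_alt mwk ng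
  have hord := pvNewOcc_ordered ng ng [] rfl
  have hDnodup : (pvNewOcc (PySem.Set.ofList []) ng).Nodup :=
    hord.2.imp (fun {a b} hlt he => absurd (he ▸ hlt) (lt_irrefl _))
  have hDmem : ∀ w ∈ mwk, w ∈ pvNewOcc (PySem.Set.ofList []) ng := by
    intro w hw
    exact (pvMem_newOcc ng _ w).2 ⟨hpre w hw, by simp [PySem.Set.ofList]⟩
  -- B's value
  have hB : apply_positions_py_alt mwk ng
      = (pvNewOcc (PySem.Set.ofList []) ng).flatMap (fun w => List.replicate (mwk.count w) w) := by
    show (ng.foldl _ ([], PySem.Set.empty)).1 = _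
    exact pvAlt_foldl mwk ng [] PySem.Set.empty
  -- A's value
  have hposmap : mwk.foldl (fun acc word => acc ++ [(PySem.List.index? ng word).getD 0]) []
      = mwk.map (fun w => ng.idxOf w) := by
    rw [PySem.List.foldl_append_singleton_eq_map, List.nil_append]
    refine List.map_congr_left ?_
    intro w hw
    rw [PySem.List.index?_eq_idxOf?]
    exact pvIdxOf?_getD ng w (hpre w hw)
  have hperm : (mwk.map (fun w => ng.idxOf w)).Perm
      ((pvNewOcc (PySem.Set.ofList []) ng).flatMap
        (fun w => List.replicate (mwk.count w) (ng.idxOf w))) := by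
    have h0 := (pvPerm_group mwk _ hDnodup hDmem).map (fun w => ng.idxOf w)
    simpa [List.map_flatMap] using h0
  have hpw : ((pvNewOcc (PySem.Set.ofList []) ng).flatMap
        (fun w => List.replicate (mwk.count w) (ng.idxOf w))).Pairwise (fun a b => a ≤ b) :=
    pvPairwise_flatMap _ _ _ hord.2
  have hsorted : PySem.List.sorted (mwk.map (fun w => ng.idxOf w)) (fun x => x) false
      = (pvNewOcc (PySem.Set.ofList []) ng).flatMap
          (fun w => List.replicate (mwk.count w) (ng.idxOf w)) :=
    PySem.List.sorted_id_eq_of_perm_of_pairwise _ _ hperm.symm hpw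
  show (PySem.List.sorted
      (mwk.foldl (fun acc word => acc ++ [(PySem.List.index? ng word).getD 0]) []) (fun x => x) false).foldl
      (fun label pos => label ++ [ng.getD pos ""]) [] = _
  rw [hposmap, hsorted, PySem.List.foldl_append_singleton_eq_map, List.nil_append,
    List.map_flatMap, hB]
  refine pvFlatMap_congr_mem _ _ _ ?_
  intro w hw
  have hwng : w ∈ ng := ((pvMem_newOcc ng _ w).1 hw).1
  rw [List.map_replicate, pvGetD_idxOf ng w hwng]
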